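-- pv_equiv track=rewrite | github.com/ivanzuev78/Otchet | Otchet.py | input_name
-- ===== SOURCE A (Python) =====
-- def input_name(name: str) -> str:
--     """
--     :param name: str (ФамилияИ.О. в любом формате)
--     :return: str (Фамилия И.О. с пробелом после фамилии)
--     """
--
--     integ = ''  # Возвращаемая строка
--     probel_check = False  # Флаг для постановки пробела после фамилии
--     prev = ''  # Предыдущий символ при проходе ФИО
--     for index, i in enumerate(name):  # Проходим по всем элементам
--         if i == '.' and not probel_check:  # Если встречаем точку
--             integ += ' '  # Вставляем пробел перед добавлением предыдущего символа
--             probel_check = True   # Меняем флаг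
--         if i != ' ':  # Если символ не пробел
--             integ += prev  # Добавляем предыдущий
--             prev = i  # Запоминаем текущий
--     integ += prev  # Добавляем последний в конце
--     return integ  # Возвращаем ФИО
-- ===== SOURCE B (Python) =====
-- def input_name(name: str) -> str:
--     """
--     :param name: str (ФамилияИ.О. в любом формате)
--     :return: str (Фамилия И.О. с пробелом после фамилии)
--     """
--     s = name.replace(' ', '')
--     p = s.find('.')
--     if p == -1:
--         return s
--     if p == 0:
--         return ' ' + s
--     return s[:p - 1] + ' ' + s[p - 1:]
-- ===== Notes on version B (the rewrite author's own statement) =====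
-- stated objective: simpler
-- what changed: Replaces A's character-by-character state machine (lag buffer + space flag) with a direct find-and-slice: strip spaces with replace, locate the first dot with find, and insert one space before the character preceding it.
import Mathlib
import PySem

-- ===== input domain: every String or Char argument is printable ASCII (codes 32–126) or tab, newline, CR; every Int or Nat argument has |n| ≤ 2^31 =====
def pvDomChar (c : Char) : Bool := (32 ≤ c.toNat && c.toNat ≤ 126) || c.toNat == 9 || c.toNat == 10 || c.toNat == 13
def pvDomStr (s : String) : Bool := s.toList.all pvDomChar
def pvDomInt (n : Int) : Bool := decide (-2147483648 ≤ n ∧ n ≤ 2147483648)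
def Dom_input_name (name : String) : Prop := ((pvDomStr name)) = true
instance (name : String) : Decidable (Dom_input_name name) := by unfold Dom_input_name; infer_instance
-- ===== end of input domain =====

-- B replaces A's char-by-char state machine with find-and-slice (simpler); return values proved equal on all inputs.

-- ===== PORT A =====
-- state: (integ, probel_check, prev) with prev as an empty-or-singleton char list (Python's '' / one-char string)
def pvStepA (st : List Char × Bool × List Char) (i : Char) : List Char × Bool × List Char :=
  let st1 := if i = '.' ∧ st.2.1 = false then (st.1 ++ [' '], true, st.2.2) else st
  if i ≠ ' ' then (st1.1 ++ st1.2.2, st1.2.1, [i]) else st1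

def input_name (name : String) : String :=
  let r := name.toList.foldl pvStepA ([], false, [])
  String.ofList (r.1 ++ r.2.2)

-- ===== PORT B =====
def input_name_alt (name : String) : String :=
  let s := PySem.Str.replace name " " ""
  let p := PySem.Str.find s "."
  if p = -1 then s
  else if p = 0 then " " ++ s
  else PySem.Str.slice s none (some (p - 1)) ++ " " ++ PySem.Str.slice s (some (p - 1)) none

-- ===== PRECONDITION & SPEC =====
def Spec_input_name (name : String) (out : String) : Prop := out = input_name_alt name
instance (name : String) (out : String) : Decidable (Spec_input_name name out) := by unfold Spec_input_name; infer_instance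

-- ===== CLAIM (what is proved, stated in full; the proofs are below) =====
def Claim_equal_input_name : Prop := ∀ (name : String), Dom_input_name name → Spec_input_name name (input_name name)

-- ===== LEMMAS AND PROOFS =====

-- A ignores spaces entirely
theorem pvA_skip_spaces (l : List Char) (st : List Char × Bool × List Char) :
    l.foldl pvStepA st = (l.filter (fun c => c ≠ ' ')).foldl pvStepA st := by
  induction l generalizing st with
  | nil => rfl
  | cons c t ih =>
    by_cases hc : c = ' '
    · subst hc
      simp [List.foldl, pvStepA, ih]
    · simp [List.foldl, hc, ih]

-- with the flag already set, A just shifts every char through the lag buffer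
theorem pvA_run_true (l : List Char) (h : ∀ c ∈ l, c ≠ ' ') (I prev : List Char) :
    (l.foldl pvStepA (I, true, prev)).1 ++ (l.foldl pvStepA (I, true, prev)).2.2
      = I ++ prev ++ l ∧ (l.foldl pvStepA (I, true, prev)).2.1 = true := by
  induction l generalizing I prev with
  | nil => simp
  | cons c t ih =>
    have hc : c ≠ ' ' := h c (by simp)
    have ht : ∀ x ∈ t, x ≠ ' ' := fun x hx => h x (by simp [hx])
    have := ih ht (I ++ prev) [c]
    simp [List.foldl, pvStepA, hc] at this ⊢
    exact this

-- with the flag unset, A's result on a space-free list is pvOut shifted by the pending state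
theorem pvA_run_false (l : List Char) (h : ∀ c ∈ l, c ≠ ' ') (I prev : List Char) :
    (l.foldl pvStepA (I, false, prev)).1 ++ (l.foldl pvStepA (I, false, prev)).2.2
      = I ++ (match l.findIdx? (· = '.') with
              | none => prev ++ l
              | some 0 => ' ' :: (prev ++ l)
              | some (p+1) => prev ++ (l.take p ++ ' ' :: l.drop p)) := by
  induction l generalizing I prev with
  | nil => simp
  | cons c t ih =>
    have hc : c ≠ ' ' := h c (by simp)
    have ht : ∀ x ∈ t, x ≠ ' ' := fun x hx => h x (by simp [hx])
    by_cases hd : c = '.'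
    · subst hd
      have hstep : List.foldl pvStepA (I, false, prev) ('.' :: t)
          = List.foldl pvStepA ((I ++ [' ']) ++ prev, true, ['.']) t := by
        simp [List.foldl, pvStepA, hc]
      have hrun := pvA_run_true t ht ((I ++ [' ']) ++ prev) ['.']
      rw [List.findIdx?_cons]
      simp only [decide_true]
      rw [hstep, hrun.1]
      simp
    · have hstep : List.foldl pvStepA (I, false, prev) (c :: t)
          = List.foldl pvStepA (I ++ prev, false, [c]) t := by
        simp [List.foldl, pvStepA, hc, hd]
      have := ih ht (I ++ prev) [c]
      rw [List.findIdx?_cons]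
      simp only [decide_eq_true_eq, if_neg hd]
      rw [hstep, this]
      rcases hfi : t.findIdx? (· = '.') with _ | p
      · simp
      · rcases p with _ | q
        · simp
        · simp

-- B's replace(' ','') is the space filter
theorem pvReplace_go_filter (l acc : List Char) :
    PySem.Chars.replace.go [' '] [] l.length l acc
      = acc.reverse ++ l.filter (fun c => c ≠ ' ') := by
  induction l generalizing acc with
  | nil => simp [PySem.Chars.replace.go]
  | cons c t ih =>
    by_cases hc : c = ' '
    · subst hc
      simpa [PySem.Chars.replace.go, List.isPrefixOf] using ih acc
    · simp [PySem.Chars.replace.go, List.isPrefixOf, hc, ih (c :: acc)]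
      exact fun h => absurd h.symm hc

theorem pvReplace_filter (l : List Char) :
    PySem.Chars.replace l [' '] [] = l.filter (fun c => c ≠ ' ') := by
  simpa [PySem.Chars.replace] using pvReplace_go_filter l []

-- B's find('.') is the index of the first dot
theorem pvFind_go_dot (l : List Char) (k : Nat) :
    PySem.Chars.find.go ['.'] l k
      = match l.findIdx? (· = '.') with
        | none => -1
        | some q => ((k + q : Nat) : Int) := by
  induction l generalizing k with
  | nil => simp [PySem.Chars.find.go]
  | cons c t ih =>
    rw [List.findIdx?_cons]
    by_cases hc : c = '.'
    · subst hc
      simp [PySem.Chars.find.go, List.isPrefixOf]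
    · have hrec : PySem.Chars.find.go ['.'] (c :: t) k = PySem.Chars.find.go ['.'] t (k + 1) := by
        simp [PySem.Chars.find.go, List.isPrefixOf]
        exact fun h => absurd h.symm hc
      rw [hrec, ih (k + 1)]
      simp only [decide_eq_true_eq, if_neg hc]
      rcases t.findIdx? (· = '.') with _ | q
      · rfl
      · simp only [Option.map_some]
        push_cast
        ring

theorem pvFind_dot (l : List Char) :
    PySem.Chars.find l ['.']
      = match l.findIdx? (· = '.') with
        | none => -1
        | some q => (q : Int) := by
  have := pvFind_go_dot l 0
  simpa [PySem.Chars.find] using this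

theorem input_name_spec : Claim_equal_input_name := by
  intro name _
  unfold Spec_input_name
  apply String.toList_inj.mp
  have hnos : ∀ c ∈ name.toList.filter (fun c => c ≠ ' '), c ≠ ' ' := by
    intro c hc
    have := (List.mem_filter.mp hc).2
    simpa using this
  have hA : (input_name name).toList
      = (match (name.toList.filter (fun c => c ≠ ' ')).findIdx? (· = '.') with
         | none => name.toList.filter (fun c => c ≠ ' ')
         | some 0 => ' ' :: name.toList.filter (fun c => c ≠ ' ')
         | some (p+1) => (name.toList.filter (fun c => c ≠ ' ')).take p
             ++ ' ' :: (name.toList.filter (fun c => c ≠ ' ')).drop p) := by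
    unfold input_name
    rw [pvA_skip_spaces, String.toList_ofList, pvA_run_false _ hnos]
    rcases (name.toList.filter (fun c => c ≠ ' ')).findIdx? (· = '.') with _ | (_ | q) <;> simp
  have hs : (PySem.Str.replace name " " "").toList
      = name.toList.filter (fun c => c ≠ ' ') := by
    simp [pvReplace_filter]
  have hp : PySem.Str.find (PySem.Str.replace name " " "") "."
      = match (name.toList.filter (fun c => c ≠ ' ')).findIdx? (· = '.') with
        | none => -1
        | some q => (q : Int) := by
    simp only [PySem.Str.find, hs]
    exact pvFind_dot _
  rw [hA]
  unfold input_name_alt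
  dsimp only
  rcases hfi : (name.toList.filter (fun c => c ≠ ' ')).findIdx? (· = '.') with _ | (_ | q) <;>
    rw [hfi] at hp <;> simp only at hp
  · rw [hp]
    norm_num
    simp [pvReplace_filter]
  · rw [hp]
    norm_num
    simp [pvReplace_filter]
  · rw [hp]
    have h1 : ¬ ((((q + 1 : Nat)) : Int) = -1) := by omega
    have h2 : ¬ ((((q + 1 : Nat)) : Int) = 0) := by omega
    have h3 : (((q + 1 : Nat)) : Int) - 1 = ((q : Nat) : Int) := by omega
    rw [if_neg h1, if_neg h2, h3]
    simp [PySem.Str.slice, PySem.List.slice_to_natCast, PySem.List.slice_from_natCast,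
      PySem.Str.replace, pvReplace_filter]
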